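-- pv_equiv track=rewrite | github.com/logxdx/deadly_python | COL100/LAB5/q5.py | get_valid_passwords
-- ===== SOURCE A (Python) =====
-- def get_valid_passwords(passwords):
--     res=[]
--     for i in passwords:
--         lcase,num,char=0,0,0
--         if len(i)>=6 and len(i)<=12:
--             lcase=sum([1 for c in i if c.islower()])
--             num=sum([1 for c in i if c.isdigit()])
--             char=sum([1 for c in i if c in '$@#'])
--             if lcase>0 and num>0 and char>0:
--                 res.append(i)
--     return res
-- ===== SOURCE B (Python) =====
-- def get_valid_passwords(passwords):
--     valid = []
--     for pw in passwords:
--         if 6 <= len(pw) <= 12: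
--             has_lower = has_digit = has_special = False
--             for c in pw:
--                 if c.islower():
--                     has_lower = True
--                 if c.isdigit():
--                     has_digit = True
--                 if c in '$@#':
--                     has_special = True
--                 if has_lower and has_digit and has_special:
--                     break
--             if has_lower and has_digit and has_special:
--                 valid.append(pw)
--     return valid
-- ===== Notes on version B (the rewrite author's own statement) =====
-- stated objective: simpler
-- what changed: Replaces A's three separate counting comprehensions per password (plus integer-count comparisons) by a single flag-tracking scan over the characters with an early break once all three flags are set.
import Mathlib
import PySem

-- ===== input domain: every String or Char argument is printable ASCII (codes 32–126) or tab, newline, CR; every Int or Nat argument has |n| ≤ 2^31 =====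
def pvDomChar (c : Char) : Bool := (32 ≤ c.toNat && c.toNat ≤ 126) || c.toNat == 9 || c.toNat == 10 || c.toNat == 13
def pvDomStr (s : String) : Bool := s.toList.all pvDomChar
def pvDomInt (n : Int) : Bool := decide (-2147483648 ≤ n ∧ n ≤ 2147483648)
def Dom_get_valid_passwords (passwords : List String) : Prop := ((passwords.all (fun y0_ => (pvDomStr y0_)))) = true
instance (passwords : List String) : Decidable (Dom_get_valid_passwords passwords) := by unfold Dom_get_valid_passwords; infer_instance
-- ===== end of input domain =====

-- B changes the decomposition: one flag-tracking scan with early exit per password instead of A's three counting comprehensions (objective: simpler).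

-- ===== PORT A =====
def get_valid_passwords (passwords : List String) : List String :=
  passwords.foldl (fun res i =>
    -- lcase, num, char = 0, 0, 0 (only used inside the length branch)
    if 6 ≤ PySem.Str.len i ∧ PySem.Str.len i ≤ 12 then
      let lcase : Int := ((i.toList.filter (fun c => PySem.Chars.islower c)).map (fun _ => (1 : Int))).sum
      let num : Int := ((i.toList.filter (fun c => PySem.Chars.isdigit c)).map (fun _ => (1 : Int))).sum
      let char : Int := ((i.toList.filter (fun c => PySem.Str.isIn (String.ofList [c]) "$@#")).map (fun _ => (1 : Int))).sum
      if 0 < lcase ∧ 0 < num ∧ 0 < char then res ++ [i] else res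
    else res) []

-- ===== PORT B =====
-- inner character scan of B: three flags, early break once all are set
def pvFlagScan : List Char → Bool → Bool → Bool → Bool × Bool × Bool
  | [], l, n, s => (l, n, s)
  | c :: cs, l, n, s =>
    let l' := if PySem.Chars.islower c then true else l
    let n' := if PySem.Chars.isdigit c then true else n
    let s' := if PySem.Str.isIn (String.ofList [c]) "$@#" then true else s
    if l' && n' && s' then (l', n', s') else pvFlagScan cs l' n' s'

def get_valid_passwords_alt (passwords : List String) : List String :=
  match passwords with
  | [] => []
  | pw :: rest =>
    if 6 ≤ PySem.Str.len pw ∧ PySem.Str.len pw ≤ 12 then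
      match pvFlagScan pw.toList false false false with
      | (l, n, s) =>
        if l && n && s then pw :: get_valid_passwords_alt rest
        else get_valid_passwords_alt rest
    else get_valid_passwords_alt rest

-- ===== PRECONDITION & SPEC =====
def Spec_get_valid_passwords (passwords : List String) (out : List String) : Prop := out = get_valid_passwords_alt passwords
instance (passwords : List String) (out : List String) : Decidable (Spec_get_valid_passwords passwords out) := by unfold Spec_get_valid_passwords; infer_instance

-- ===== CLAIM (what is proved, stated in full; the proofs are below) =====
def Claim_equal_get_valid_passwords : Prop := ∀ (passwords : List String), Dom_get_valid_passwords passwords → Spec_get_valid_passwords passwords (get_valid_passwords passwords)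

-- ===== LEMMAS AND PROOFS =====

-- the flag scan computes "initial flag OR some character satisfies the test", for each flag
theorem pvFlagScan_eq (cs : List Char) (l n s : Bool) :
    pvFlagScan cs l n s =
      (l || cs.any (fun c => PySem.Chars.islower c),
       n || cs.any (fun c => PySem.Chars.isdigit c),
       s || cs.any (fun c => PySem.Str.isIn (String.ofList [c]) "$@#")) := by
  induction cs generalizing l n s with
  | nil => show (l, n, s) = _; simp
  | cons c cs ih =>
    simp only [pvFlagScan, List.any_cons]
    have el : (if PySem.Chars.islower c then true else l) = (l || PySem.Chars.islower c) := by
      cases PySem.Chars.islower c <;> simp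
    have en : (if PySem.Chars.isdigit c then true else n) = (n || PySem.Chars.isdigit c) := by
      cases PySem.Chars.isdigit c <;> simp
    have es : (if PySem.Str.isIn (String.ofList [c]) "$@#" then true else s) =
        (s || PySem.Str.isIn (String.ofList [c]) "$@#") := by
      cases PySem.Str.isIn (String.ofList [c]) "$@#" <;> simp
    rw [el, en, es, ih]
    by_cases h : ((l || PySem.Chars.islower c) && (n || PySem.Chars.isdigit c) &&
        (s || PySem.Str.isIn (String.ofList [c]) "$@#")) = true
    · rw [if_pos h]
      simp only [Bool.and_eq_true] at h
      rw [← Bool.or_assoc, ← Bool.or_assoc, ← Bool.or_assoc, h.1.1, h.1.2, h.2]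
      simp
    · rw [if_neg h]
      simp [Bool.or_assoc]

theorem sum_ones_pos_iff (p : Char → Bool) (cs : List Char) :
    (0 < ((cs.filter p).map (fun _ => (1 : Int))).sum) ↔ cs.any p := by
  induction cs with
  | nil => simp
  | cons c cs ih =>
    by_cases h : p c
    · have hnn : (0 : Int) ≤ ((cs.filter p).map (fun _ => (1 : Int))).sum := by
        apply List.sum_nonneg; intro x hx; simp at hx; omega
      simp [List.filter_cons, h]
      omega
    · simp [List.filter_cons, h, ih]

theorem get_valid_passwords_foldl (passwords : List String) (res : List String) :
    passwords.foldl (fun res i =>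
      if 6 ≤ PySem.Str.len i ∧ PySem.Str.len i ≤ 12 then
        let lcase : Int := ((i.toList.filter (fun c => PySem.Chars.islower c)).map (fun _ => (1 : Int))).sum
        let num : Int := ((i.toList.filter (fun c => PySem.Chars.isdigit c)).map (fun _ => (1 : Int))).sum
        let char : Int := ((i.toList.filter (fun c => PySem.Str.isIn (String.ofList [c]) "$@#")).map (fun _ => (1 : Int))).sum
        if 0 < lcase ∧ 0 < num ∧ 0 < char then res ++ [i] else res
      else res) res = res ++ get_valid_passwords_alt passwords := by
  induction passwords generalizing res with
  | nil => simp [get_valid_passwords_alt]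
  | cons pw rest ih =>
    simp only [List.foldl_cons, get_valid_passwords_alt, pvFlagScan_eq, Bool.false_or]
    by_cases hlen : 6 ≤ PySem.Str.len pw ∧ PySem.Str.len pw ≤ 12
    · simp only [if_pos hlen]
      by_cases hc : ((pw.toList.any fun c => PySem.Chars.islower c)
          && (pw.toList.any fun c => PySem.Chars.isdigit c)
          && (pw.toList.any fun c => PySem.Str.isIn (String.ofList [c]) "$@#")) = true
      · have hc' := hc
        simp only [Bool.and_eq_true] at hc'
        rw [if_pos (⟨(sum_ones_pos_iff _ _).2 hc'.1.1, (sum_ones_pos_iff _ _).2 hc'.1.2,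
            (sum_ones_pos_iff _ _).2 hc'.2⟩ :
            0 < ((pw.toList.filter (fun c => PySem.Chars.islower c)).map (fun _ => (1 : Int))).sum ∧
            0 < ((pw.toList.filter (fun c => PySem.Chars.isdigit c)).map (fun _ => (1 : Int))).sum ∧
            0 < ((pw.toList.filter (fun c => PySem.Str.isIn (String.ofList [c]) "$@#")).map
              (fun _ => (1 : Int))).sum),
          ih, if_pos hc]
        simp
      · rw [if_neg (fun h => hc (by
            simp only [Bool.and_eq_true]
            exact ⟨⟨(sum_ones_pos_iff _ _).1 h.1, (sum_ones_pos_iff _ _).1 h.2.1⟩,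
              (sum_ones_pos_iff _ _).1 h.2.2⟩)),
          ih, if_neg hc]
    · simp only [if_neg hlen]
      exact ih res

-- ===== VERDICT (by name: the statement is the Claim_ definition above) =====
theorem get_valid_passwords_spec : Claim_equal_get_valid_passwords := by
  intro passwords _
  unfold Spec_get_valid_passwords get_valid_passwords
  simpa using get_valid_passwords_foldl passwords []
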